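-- pv_equiv track=rewrite | github.com/BiznetGIO/RESTKnot | restknot/libs/utils.py | eleminator
-- ===== SOURCE A (Python) =====
-- def eleminator(obj):
--     delkeys = list()
--     for i in obj:
--         if obj[i] is None or obj[i] is False :
--             delkeys.append(i)
--
--     for i in delkeys:
--         obj.pop(i)
--
--     return obj
-- ===== SOURCE B (Python) =====
-- def eleminator(obj):
--     # Invert the test: build the surviving entries once, then rebuild obj in place.
--     keep = {k: v for k, v in obj.items() if v is not None and v is not False}
--     obj.clear()
--     obj.update(keep)
--     return obj
-- ===== Notes on version B (the rewrite author's own statement) =====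
-- stated objective: simpler
-- what changed: A collects doomed keys in a first pass and pops them one by one in a second pass; B inverts the test and builds the surviving entries in one comprehension, then clears and repopulates the same dict.
import Mathlib
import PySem

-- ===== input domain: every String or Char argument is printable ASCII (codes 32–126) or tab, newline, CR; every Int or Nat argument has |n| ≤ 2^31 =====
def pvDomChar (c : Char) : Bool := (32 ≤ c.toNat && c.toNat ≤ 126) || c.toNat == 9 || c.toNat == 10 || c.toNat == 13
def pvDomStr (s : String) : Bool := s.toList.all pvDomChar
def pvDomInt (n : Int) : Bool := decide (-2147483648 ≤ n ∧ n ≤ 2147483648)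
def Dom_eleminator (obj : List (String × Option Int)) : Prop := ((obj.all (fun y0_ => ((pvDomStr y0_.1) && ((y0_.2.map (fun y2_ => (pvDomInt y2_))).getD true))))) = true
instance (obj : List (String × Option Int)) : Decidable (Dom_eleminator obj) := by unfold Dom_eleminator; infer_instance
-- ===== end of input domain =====

-- ===== PORT A =====
-- B replaces A's collect-doomed-keys-then-pop two-pass with a filter-and-rebuild decomposition (simpler, same cost).
-- Both Pythons mutate the caller's dict in place and return it; the equivalence proved is about the returned dict.
-- Values are Optional[int], so the Python test `obj[i] is False` can never hold; the `is None` test is `== some none`.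
def eleminator (obj : List (String × Option Int)) : List (String × Option Int) :=
  let d : PySem.Dict String (Option Int) := PySem.Dict.mk obj
  -- delkeys = []; for i in obj: if obj[i] is None or obj[i] is False: delkeys.append(i)
  let delkeys : List String :=
    d.keys.foldl (fun acc i => if d.get? i == some none then acc ++ [i] else acc) []
  -- for i in delkeys: obj.pop(i)   (the popped value is discarded, and i is always a present key)
  let d2 : PySem.Dict String (Option Int) := delkeys.foldl (fun d i => d.erase i) d
  d2.items

-- ===== PORT B =====
def eleminator_alt (obj : List (String × Option Int)) : List (String × Option Int) :=
  -- keep = {k: v for k, v in obj.items() if v is not None and v is not False}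
  let keep : List (String × Option Int) := obj.filter (fun p => !(p.2 == none))
  -- obj.clear(); obj.update(keep); return obj
  let d : PySem.Dict String (Option Int) := (PySem.Dict.empty).update keep
  d.items

-- ===== PRECONDITION & SPEC =====
-- Pre_ excludes association lists with duplicate keys, which do not represent any Python dict (A's input type).
def Pre_eleminator (obj : List (String × Option Int)) : Prop := (obj.map Prod.fst).Nodup
instance (obj : List (String × Option Int)) : Decidable (Pre_eleminator obj) := by unfold Pre_eleminator; infer_instance
def pvWitness_eleminator : (List (String × Option Int)) := [("a", none), ("b", some 1), ("c", some 0)]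
def Spec_eleminator (obj : List (String × Option Int)) (out : List (String × Option Int)) : Prop := out = eleminator_alt obj
instance (obj : List (String × Option Int)) (out : List (String × Option Int)) : Decidable (Spec_eleminator obj out) := by unfold Spec_eleminator; infer_instance

-- ===== CLAIM (what is proved, stated in full; the proofs are below) =====
def Claim_equal_eleminator : Prop := ∀ (obj : List (String × Option Int)), Dom_eleminator obj → Pre_eleminator obj → Spec_eleminator obj (eleminator obj)

-- ===== LEMMAS AND PROOFS =====

-- folding `erase` over a list of keys filters the items once
theorem foldl_erase_items (ks : List String) (d : PySem.Dict String (Option Int)) :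
    (ks.foldl (fun d i => d.erase i) d).items = d.items.filter (fun p => !(ks.contains p.1)) := by
  induction ks generalizing d with
  | nil => simp
  | cons k ks ih =>
    rw [List.foldl_cons, ih]
    simp only [PySem.Dict.erase, List.filter_filter]
    apply List.filter_congr
    intro p _
    simp only [List.contains_cons, Bool.not_or, Bool.and_comm]

-- B's rebuild of the surviving entries returns exactly the filtered item list
theorem alt_eq_filter (obj : List (String × Option Int)) (hpre : Pre_eleminator obj) :
    eleminator_alt obj = obj.filter (fun p => !(p.2 == none)) := by
  unfold eleminator_alt PySem.Dict.update
  have hsub : (obj.filter (fun p => !(p.2 == none))).Sublist obj := List.filter_sublist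
  have hnd : ((obj.filter (fun p => !(p.2 == none))).map Prod.fst).Nodup :=
    hpre.sublist (hsub.map Prod.fst)
  rw [PySem.Dict.items_foldl_insert_fresh _ Prod.fst Prod.snd _
      (fun a _ => PySem.Dict.contains_empty a.1) hnd]
  simp [PySem.Dict.empty]

theorem eleminator_spec : Claim_equal_eleminator := by
  intro obj _ hpre
  unfold Spec_eleminator
  rw [alt_eq_filter obj hpre]
  unfold eleminator
  simp only [PySem.List.foldl_append_if, foldl_erase_items, List.nil_append]
  apply List.filter_congr
  intro p hp
  have hget : (PySem.Dict.mk obj).get? p.1 = some p.2 :=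
    PySem.Dict.get?_of_mem_items _ (by simpa using hp) hpre
  have hkey : p.1 ∈ (PySem.Dict.mk obj).keys := List.mem_map_of_mem hp
  cases hv : p.2 <;> simp [List.mem_filter, hget, hv]
  exact ⟨p.2, by simpa using hp⟩
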